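-- pv_equiv track=rewrite | github.com/nkamadan/Deependency | ldd.py | detect_timing
-- ===== SOURCE A (Python) =====
-- timing_functions = ['localtime','asctime','clock_get_time','timespec_get','clock_gettime','system_clock::now']
--
-- def detect_timing(dump):
--     splitted_by_ws = dump.split()
--     for elem in splitted_by_ws:
--         for func in timing_functions:
--             if elem.find(func) > -1:
--                 return 1
--         if elem.find("rdtsc") > -1 or elem.find("rdtscp") > -1:
--             return 1
--     return 0
-- ===== SOURCE B (Python) =====
-- timing_functions = ['localtime','asctime','clock_get_time','timespec_get','clock_gettime','system_clock::now']
--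
-- all_patterns = timing_functions + ['rdtsc', 'rdtscp']
--
-- def detect_timing(dump):
--     for pattern in all_patterns:
--         if dump.find(pattern) > -1:
--             return 1
--     return 0
-- ===== Notes on version B (the rewrite author's own statement) =====
-- stated objective: simpler
-- what changed: B drops the whitespace split entirely and scans the whole dump once per pattern (a flat per-pattern substring search) instead of A's token-by-token nested scan; this is exact because no pattern contains whitespace, so a pattern occurs in some token iff it occurs in the dump.
import Mathlib
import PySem

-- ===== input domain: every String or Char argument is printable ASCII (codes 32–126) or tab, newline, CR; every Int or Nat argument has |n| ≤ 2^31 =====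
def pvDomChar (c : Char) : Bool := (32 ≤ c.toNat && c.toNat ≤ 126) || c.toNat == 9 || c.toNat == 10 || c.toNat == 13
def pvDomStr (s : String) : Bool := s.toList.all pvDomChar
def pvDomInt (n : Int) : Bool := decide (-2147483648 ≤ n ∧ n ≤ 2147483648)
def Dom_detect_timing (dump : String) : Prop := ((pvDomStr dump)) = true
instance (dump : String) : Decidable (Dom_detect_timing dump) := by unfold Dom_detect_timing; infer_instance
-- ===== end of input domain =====

-- B replaces A's token-by-token nested scan with one flat per-pattern search over the whole dump
-- (exact because no pattern contains whitespace); objective: simpler.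


-- ===== PORT A =====
def timing_functions : List String :=
  ["localtime", "asctime", "clock_get_time", "timespec_get", "clock_gettime", "system_clock::now"]

-- inner 'for func in timing_functions: if elem.find(func) > -1: return 1'
def detectTimingInner (elem : String) : List String → Bool
  | [] => false
  | func :: rest =>
    if PySem.Str.find elem func > -1 then true else detectTimingInner elem rest

-- outer 'for elem in splitted_by_ws: …'
def detectTimingLoop : List String → Int
  | [] => 0
  | elem :: rest =>
    if detectTimingInner elem timing_functions = true then 1
    else if PySem.Str.find elem "rdtsc" > -1 ∨ PySem.Str.find elem "rdtscp" > -1 then 1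
    else detectTimingLoop rest

def detect_timing (dump : String) : Int :=
  detectTimingLoop (PySem.Str.split₀ dump)

-- ===== PORT B =====
def all_patterns : List String := timing_functions ++ ["rdtsc", "rdtscp"]

-- 'for pattern in all_patterns: if dump.find(pattern) > -1: return 1'
def detectTimingAltLoop (dump : String) : List String → Int
  | [] => 0
  | p :: rest =>
    if PySem.Str.find dump p > -1 then 1 else detectTimingAltLoop dump rest

def detect_timing_alt (dump : String) : Int :=
  detectTimingAltLoop dump all_patterns

-- ===== PRECONDITION & SPEC =====
def Spec_detect_timing (dump : String) (out : Int) : Prop := out = detect_timing_alt dump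
instance (dump : String) (out : Int) : Decidable (Spec_detect_timing dump out) := by unfold Spec_detect_timing; infer_instance

-- ===== CLAIM (what is proved, stated in full; the proofs are below) =====
def Claim_equal_detect_timing : Prop := ∀ (dump : String), Dom_detect_timing dump → Spec_detect_timing dump (detect_timing dump)

-- ===== LEMMAS AND PROOFS =====

-- a pattern with no whitespace characters
def noSpace (l : List Char) : Bool := l.all (fun c => !PySem.Chars.isspace c)

lemma find_gt_iff (s sub : String) :
    (PySem.Str.find s sub > -1) ↔ sub.toList <:+: s.toList := by
  constructor
  · intro h; exact (PySem.Str.find_nonneg_iff s sub).1 (by omega)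
  · intro h; have := (PySem.Str.find_nonneg_iff s sub).2 h; omega

lemma prefix_through_space {sub A B : List Char} {c : Char}
    (hs : noSpace sub = true) (hc : PySem.Chars.isspace c = true) :
    sub <+: A ++ c :: B ↔ sub <+: A := by
  constructor
  · intro h
    by_cases hl : sub.length ≤ A.length
    · have h2 := List.prefix_iff_eq_take.mp h
      rw [List.take_append, Nat.sub_eq_zero_of_le hl, List.take_zero, List.append_nil] at h2
      rw [h2]
      exact List.take_prefix _ _
    · exfalso
      have hlen : A.length < sub.length := by omega
      have hg : sub[A.length]'hlen = (A ++ c :: B)[A.length]'(by simp) :=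
        h.getElem hlen
      have hr : (A ++ c :: B)[A.length]'(by simp) = c := by
        rw [List.getElem_append_right (le_refl A.length)]
        simp
      have hmem : sub[A.length]'hlen ∈ sub := List.getElem_mem _
      have hns := List.all_eq_true.mp hs _ hmem
      rw [hg, hr] at hns
      simp [hc] at hns
  · intro h; exact h.trans (List.prefix_append A (c :: B))

lemma infix_split {sub : List Char} (hne : sub ≠ []) (hs : noSpace sub = true)
    {c : Char} (hc : PySem.Chars.isspace c = true) :
    ∀ (A B : List Char), (sub <:+: A ++ c :: B ↔ sub <:+: A ∨ sub <:+: B) := by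
  intro A
  induction A with
  | nil =>
    intro B
    rw [List.nil_append, List.infix_cons_iff,
        show (c :: B) = ([] : List Char) ++ c :: B from rfl,
        prefix_through_space hs hc]
    simp [List.infix_nil, hne]
  | cons a A' ih =>
    intro B
    rw [List.cons_append, List.infix_cons_iff,
        show a :: (A' ++ c :: B) = (a :: A') ++ c :: B from rfl,
        prefix_through_space hs hc, ih B, List.infix_cons_iff]
    tauto

lemma go_exists {sub : List Char} (hne : sub ≠ []) (hs : noSpace sub = true) :
    ∀ (s cur : List Char) (acc : List (List Char)),
      (∃ t ∈ PySem.Chars.split₀.go s cur acc, sub <:+: t) ↔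
        ((∃ t ∈ acc, sub <:+: t) ∨ sub <:+: (cur.reverse ++ s)) := by
  intro s
  induction s with
  | nil =>
    intro cur acc
    simp only [PySem.Chars.split₀.go]
    by_cases hcur : cur = []
    · subst hcur
      simp [List.infix_nil, hne]
    · rw [if_neg (by simpa [List.isEmpty_iff] using hcur)]
      simp only [List.mem_reverse, List.mem_cons, List.append_nil]
      constructor
      · rintro ⟨t, (rfl | ht), hinf⟩
        · exact Or.inr hinf
        · exact Or.inl ⟨t, ht, hinf⟩
      · rintro (⟨t, ht, hinf⟩ | hinf)
        · exact ⟨t, Or.inr ht, hinf⟩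
        · exact ⟨cur.reverse, Or.inl rfl, hinf⟩
  | cons ch rest ih =>
    intro cur acc
    simp only [PySem.Chars.split₀.go]
    by_cases hsp : PySem.Chars.isspace ch = true
    · rw [if_pos hsp]
      have hk := infix_split hne hs hsp cur.reverse rest
      by_cases hcur : cur = []
      · subst hcur
        rw [if_pos (by simp)]
        rw [ih [] acc]
        simp only [List.reverse_nil, List.nil_append] at hk ⊢
        rw [hk]
        simp [List.infix_nil, hne]
      · rw [if_neg (by simpa [List.isEmpty_iff] using hcur)]
        rw [ih [] (cur.reverse :: acc)]
        simp only [List.reverse_nil, List.nil_append, List.mem_cons]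
        rw [hk]
        constructor
        · rintro (⟨t, (rfl | ht), hinf⟩ | hinf)
          · exact Or.inr (Or.inl hinf)
          · exact Or.inl ⟨t, ht, hinf⟩
          · exact Or.inr (Or.inr hinf)
        · rintro (⟨t, ht, hinf⟩ | (hinf | hinf))
          · exact Or.inl ⟨t, Or.inr ht, hinf⟩
          · exact Or.inl ⟨cur.reverse, Or.inl rfl, hinf⟩
          · exact Or.inr hinf
    · rw [if_neg hsp]
      rw [ih (ch :: cur) acc]
      simp [List.reverse_cons, List.append_assoc]

lemma infix_iff_exists_token {sub : List Char} (hne : sub ≠ []) (hs : noSpace sub = true)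
    (s : List Char) :
    sub <:+: s ↔ ∃ t ∈ PySem.Chars.split₀ s, sub <:+: t := by
  unfold PySem.Chars.split₀
  rw [go_exists hne hs s [] []]
  simp

lemma pattern_mem_token_iff {p : String} (hne : p.toList ≠ []) (hs : noSpace p.toList = true)
    (dump : String) :
    p.toList <:+: dump.toList ↔ ∃ t ∈ PySem.Str.split₀ dump, p.toList <:+: t.toList := by
  rw [infix_iff_exists_token hne hs dump.toList, ← PySem.Str.split₀_map_toList]
  constructor
  · rintro ⟨tl, htl, hinf⟩
    rcases List.mem_map.mp htl with ⟨t, ht, rfl⟩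
    exact ⟨t, ht, hinf⟩
  · rintro ⟨t, ht, hinf⟩
    exact ⟨t.toList, List.mem_map.mpr ⟨t, ht, rfl⟩, hinf⟩

lemma innerA_iff (e : String) :
    ∀ fs : List String, (detectTimingInner e fs = true ↔ ∃ f ∈ fs, f.toList <:+: e.toList) := by
  intro fs
  induction fs with
  | nil => simp [detectTimingInner]
  | cons f rest ih =>
    simp only [detectTimingInner]
    split_ifs with h
    · simp only [true_iff]
      exact ⟨f, List.mem_cons_self, (find_gt_iff e f).1 h⟩
    · rw [ih]
      constructor
      · rintro ⟨g, hg, hinf⟩; exact ⟨g, List.mem_cons_of_mem _ hg, hinf⟩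
      · rintro ⟨g, hg, hinf⟩
        rcases List.mem_cons.mp hg with rfl | hg'
        · exact absurd ((find_gt_iff e g).2 hinf) h
        · exact ⟨g, hg', hinf⟩

lemma condA_iff (e : String) :
    ((detectTimingInner e timing_functions = true) ∨
      (PySem.Str.find e "rdtsc" > -1 ∨ PySem.Str.find e "rdtscp" > -1)) ↔
      ∃ p ∈ all_patterns, p.toList <:+: e.toList := by
  rw [innerA_iff]
  simp only [all_patterns, List.mem_append, find_gt_iff]
  constructor
  · rintro (⟨f, hf, hinf⟩ | (h | h))
    · exact ⟨f, Or.inl hf, hinf⟩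
    · exact ⟨"rdtsc", Or.inr (by simp), h⟩
    · exact ⟨"rdtscp", Or.inr (by simp), h⟩
  · rintro ⟨p, (hp | hp), hinf⟩
    · exact Or.inl ⟨p, hp, hinf⟩
    · rcases (by simpa using hp : p = "rdtsc" ∨ p = "rdtscp") with rfl | rfl
      · exact Or.inr (Or.inl hinf)
      · exact Or.inr (Or.inr hinf)

lemma loopA_one_iff :
    ∀ ts : List String,
      (detectTimingLoop ts = 1 ↔ ∃ t ∈ ts, ∃ p ∈ all_patterns, p.toList <:+: t.toList) := by
  intro ts
  induction ts with
  | nil => simp [detectTimingLoop]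
  | cons e rest ih =>
    simp only [detectTimingLoop]
    split_ifs with h1 h2
    · exact iff_of_true rfl ⟨e, List.mem_cons_self, (condA_iff e).1 (Or.inl h1)⟩
    · exact iff_of_true rfl ⟨e, List.mem_cons_self, (condA_iff e).1 (Or.inr h2)⟩
    · rw [ih]
      constructor
      · rintro ⟨t, ht, hp⟩; exact ⟨t, List.mem_cons_of_mem _ ht, hp⟩
      · rintro ⟨t, ht, hp⟩
        rcases List.mem_cons.mp ht with rfl | ht'
        · rcases (condA_iff t).2 hp with hc | hc
          · exact absurd hc h1
          · exact absurd hc h2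
        · exact ⟨t, ht', hp⟩

lemma loopA_zero_or_one (ts : List String) :
    detectTimingLoop ts = 0 ∨ detectTimingLoop ts = 1 := by
  induction ts with
  | nil => simp [detectTimingLoop]
  | cons e rest ih =>
    simp only [detectTimingLoop]
    split_ifs <;> simp [ih]

lemma loopB_one_iff (dump : String) :
    ∀ ps : List String,
      (detectTimingAltLoop dump ps = 1 ↔ ∃ p ∈ ps, p.toList <:+: dump.toList) := by
  intro ps
  induction ps with
  | nil => simp [detectTimingAltLoop]
  | cons p rest ih =>
    simp only [detectTimingAltLoop]
    split_ifs with h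
    · simp only [true_iff]
      exact ⟨p, List.mem_cons_self, (find_gt_iff dump p).1 h⟩
    · rw [ih]
      constructor
      · rintro ⟨q, hq, hinf⟩; exact ⟨q, List.mem_cons_of_mem _ hq, hinf⟩
      · rintro ⟨q, hq, hinf⟩
        rcases List.mem_cons.mp hq with rfl | hq'
        · exact absurd ((find_gt_iff dump q).2 hinf) h
        · exact ⟨q, hq', hinf⟩

lemma loopB_zero_or_one (dump : String) (ps : List String) :
    detectTimingAltLoop dump ps = 0 ∨ detectTimingAltLoop dump ps = 1 := by
  induction ps with
  | nil => simp [detectTimingAltLoop]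
  | cons p rest ih =>
    simp only [detectTimingAltLoop]
    split_ifs <;> simp [ih]

lemma patterns_good :
    ∀ p ∈ all_patterns, p.toList ≠ [] ∧ noSpace p.toList = true := by
  intro p hp
  fin_cases hp <;> exact ⟨by decide, by decide⟩

lemma main_one_iff (dump : String) :
    detect_timing dump = 1 ↔ detect_timing_alt dump = 1 := by
  unfold detect_timing detect_timing_alt
  rw [loopA_one_iff, loopB_one_iff]
  constructor
  · rintro ⟨t, ht, p, hp, hinf⟩
    refine ⟨p, hp, ?_⟩
    exact (pattern_mem_token_iff (patterns_good p hp).1 (patterns_good p hp).2 dump).2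
      ⟨t, ht, hinf⟩
  · rintro ⟨p, hp, hinf⟩
    rcases (pattern_mem_token_iff (patterns_good p hp).1 (patterns_good p hp).2 dump).1 hinf
      with ⟨t, ht, htinf⟩
    exact ⟨t, ht, p, hp, htinf⟩

-- ===== VERDICT (by name: the statement is the Claim_ definition above) =====
theorem detect_timing_spec : Claim_equal_detect_timing := by
  intro dump _
  unfold Spec_detect_timing
  have hA := loopA_zero_or_one (PySem.Str.split₀ dump)
  have hB := loopB_zero_or_one dump all_patterns
  have h1 := main_one_iff dump
  unfold detect_timing detect_timing_alt at h1 ⊢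
  rcases hA with hA | hA <;> rcases hB with hB | hB
  · rw [hA, hB]
  · have h2 := h1.mpr hB; omega
  · have h2 := h1.mp hA; omega
  · rw [hA, hB]
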